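-- pv_equiv track=rewrite | github.com/jdwhitaker/cryptopals | solutions/test_23.py | i_shiftl_and_mask
-- ===== SOURCE A (Python) =====
-- w = 32
--
-- def bit(value, indx):
--     if indx < 0: return 0
--     return (value >> indx) & 0b1
--
-- def i_shiftl_and_mask(value, shift_width, and_mask):
--     out = []
--     for i in range(w):
--         # the AND mask isn't an issue w/ lower bits
--         if i < shift_width:
--             out.append(bit(value, i))
--         # w/ higher bits, we use the lower bits that have already been solved
--         else:
--             out.append(bit(value, i) ^ (out[i-shift_width] & bit(and_mask, i)))
--     r = 0
--     for i, e in enumerate(out):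
--         r += e * 2**i
--     return r
-- ===== SOURCE B (Python) =====
-- w = 32
--
-- def i_shiftl_and_mask(value, shift_width, and_mask):
--     # Whole-word fixed-point iteration: one pass per shift-block recovers the
--     # preimage of x ^ ((x << s) & and_mask) mod 2**w, no per-bit list.
--     mask32 = (1 << w) - 1
--     s = min(shift_width, w)
--     result = value & mask32
--     for _ in range(0, w, s):
--         result = (value ^ ((result << s) & and_mask)) & mask32
--     return result
-- ===== Notes on version B (the rewrite author's own statement) =====
-- stated objective: faster
-- what changed: Replaces the per-bit reconstruction (building a 32-entry bit list with a bit() helper and then re-assembling the integer) by a whole-word fixed-point iteration result = value ^ ((result << s) & and_mask) taken mod 2**32, one pass per shift-block (ceil(32/s) passes), which converges to the same inverse.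
import Mathlib
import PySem

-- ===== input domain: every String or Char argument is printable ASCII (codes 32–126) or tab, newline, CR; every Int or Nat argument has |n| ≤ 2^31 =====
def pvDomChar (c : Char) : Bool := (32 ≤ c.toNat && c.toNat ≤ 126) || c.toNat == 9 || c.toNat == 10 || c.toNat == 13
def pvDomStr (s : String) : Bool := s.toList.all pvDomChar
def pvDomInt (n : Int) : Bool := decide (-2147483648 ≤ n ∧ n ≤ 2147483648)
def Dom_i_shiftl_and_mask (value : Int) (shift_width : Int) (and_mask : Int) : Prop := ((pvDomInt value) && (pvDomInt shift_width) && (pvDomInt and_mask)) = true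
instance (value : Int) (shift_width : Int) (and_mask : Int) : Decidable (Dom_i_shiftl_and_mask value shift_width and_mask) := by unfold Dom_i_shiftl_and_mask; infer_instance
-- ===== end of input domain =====

-- B replaces A's per-bit list reconstruction by a whole-word fixed-point
-- iteration mod 2^32, one pass per shift-block (constant-factor fewer Python-level operations).

-- ===== PORT A =====
-- bit(value, indx): (value >> indx) & 1, with 0 for negative indx
def pybit (value : Int) (indx : Int) : Int :=
  if indx < 0 then 0 else PySem.Int.band (value >>> indx) 1

def i_shiftl_and_mask (value : Int) (shift_width : Int) (and_mask : Int) : Int :=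
  -- out[] built over range(32); out[i-shift_width] is in range whenever
  -- Pre_ holds (1 ≤ shift_width), where pyGetD is exact (Python raises outside Pre_)
  let out : List Int := (PySem.List.pyRange 0 32).foldl (fun (out : List Int) (i : Int) =>
    if i < shift_width then
      out ++ [pybit value i]
    else
      out ++ [PySem.Int.bxor (pybit value i)
        (PySem.Int.band (PySem.List.pyGetD out (i - shift_width) 0) (pybit and_mask i))]) []
  -- r = sum over enumerate(out) of e * 2**i; the enumerate index is ≥ 0, so ^ toNat is exact
  (PySem.List.enumerate out).foldl (fun r p => r + p.2 * 2 ^ p.1.toNat) 0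

-- ===== PORT B =====
def i_shiftl_and_mask_alt (value : Int) (shift_width : Int) (and_mask : Int) : Int :=
  let mask32 : Int := (1 <<< (32 : Int)) - 1
  let s : Int := min shift_width 32
  let r0 : Int := PySem.Int.band value mask32
  -- for _ in range(0, 32, s): one pass per shift-block (Python raises ValueError when s = 0)
  (PySem.List.pyRange 0 32 s).foldl (fun result _ =>
    PySem.Int.band (PySem.Int.bxor value (PySem.Int.band (result <<< s) and_mask)) mask32) r0

-- ===== PRECONDITION & SPEC =====
-- Pre_ excludes exactly shift_width ≤ 0, where A raises IndexError (out[i-shift_width]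
-- is read at a position not yet appended); B raises or returns there, nothing is claimed.
def Pre_i_shiftl_and_mask (value : Int) (shift_width : Int) (and_mask : Int) : Prop :=
  1 ≤ shift_width
instance (value : Int) (shift_width : Int) (and_mask : Int) : Decidable (Pre_i_shiftl_and_mask value shift_width and_mask) := by unfold Pre_i_shiftl_and_mask; infer_instance

def pvWitness_i_shiftl_and_mask : Int × Int × Int := (0, 1, 0)

def Spec_i_shiftl_and_mask (value : Int) (shift_width : Int) (and_mask : Int) (out : Int) : Prop := out = i_shiftl_and_mask_alt value shift_width and_mask
instance (value : Int) (shift_width : Int) (and_mask : Int) (out : Int) : Decidable (Spec_i_shiftl_and_mask value shift_width and_mask out) := by unfold Spec_i_shiftl_and_mask; infer_instance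

-- ===== CLAIM (what is proved, stated in full; the proofs are below) =====
def Claim_equal_i_shiftl_and_mask : Prop := ∀ (value : Int) (shift_width : Int) (and_mask : Int), Dom_i_shiftl_and_mask value shift_width and_mask → Pre_i_shiftl_and_mask value shift_width and_mask → Spec_i_shiftl_and_mask value shift_width and_mask (i_shiftl_and_mask value shift_width and_mask)

-- ===== LEMMAS AND PROOFS =====

-- the intended bit i of the inverse, for tempering shift sp+1
def obit (sp : Nat) (v m : Int) (i : Nat) : Bool :=
  if _h : i < sp + 1 then v.testBit i
  else xor (v.testBit i) (obit sp v m (i - (sp + 1)) && m.testBit i)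
termination_by i
decreasing_by omega

-- the number with low bits f 0 … f (k-1)
def nb (f : Nat → Bool) : Nat → Nat
  | 0 => 0
  | k + 1 => nb f k + (f k).toNat * 2 ^ k

theorem land_add_ldiff (m : Nat) : ∀ n : Nat, (m &&& n) + m.ldiff n = m := by
  induction m using Nat.binaryRec with
  | zero => intro n; simp [Nat.ldiff, Nat.bitwise_zero_left]
  | bit b m ih =>
    intro n
    induction n using Nat.binaryRec with
    | zero => simp [Nat.ldiff, Nat.bitwise_zero_right]
    | bit c n _ =>
      rw [Nat.land_bit, Nat.ldiff_bit, Nat.bit_val, Nat.bit_val, Nat.bit_val]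
      have := ih n
      cases b <;> cases c <;> simp at * <;> omega

theorem band_eq_land (a b : Int) : PySem.Int.band a b = Int.land a b := by
  have key : ∀ m n : Nat, m.ldiff n = m - (m &&& n) := fun m n => by
    have := land_add_ldiff m n; omega
  have hns : ∀ n : Nat, ¬ (0:Int) ≤ Int.negSucc n := fun n => by
    rw [Int.negSucc_eq]; omega
  have hts : ∀ n : Nat, (-(Int.negSucc n) - 1).toNat = n := fun n => by
    rw [Int.negSucc_eq]; omega
  rcases a with m | m <;> rcases b with n | n <;> simp only [PySem.Int.band]
  · rw [if_pos (by exact Int.natCast_nonneg m), if_pos (by exact Int.natCast_nonneg n)]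
    simp [Int.land]
  · rw [if_pos (by exact Int.natCast_nonneg m), if_neg (hns n)]
    simp [Int.land, hts, key]
  · rw [if_neg (hns m), if_pos (by exact Int.natCast_nonneg n)]
    simp [Int.land, hts, key]
  · rw [if_neg (hns m), if_neg (hns n)]
    simp [Int.land, hts, Int.negSucc_eq]
    omega

theorem bxor_eq_xor (a b : Int) : PySem.Int.bxor a b = Int.xor a b := by
  have hns : ∀ n : Nat, ¬ (0:Int) ≤ Int.negSucc n := fun n => by
    rw [Int.negSucc_eq]; omega
  have hts : ∀ n : Nat, (-(Int.negSucc n) - 1).toNat = n := fun n => by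
    rw [Int.negSucc_eq]; omega
  rcases a with m | m <;> rcases b with n | n <;> simp only [PySem.Int.bxor]
  · rw [if_pos (by exact Int.natCast_nonneg m), if_pos (by exact Int.natCast_nonneg n)]
    simp [Int.xor]
  · rw [if_pos (by exact Int.natCast_nonneg m), if_neg (hns n)]
    simp [Int.xor, hts, Int.negSucc_eq]
    omega
  · rw [if_neg (hns m), if_pos (by exact Int.natCast_nonneg n)]
    simp [Int.xor, hts, Int.negSucc_eq]
    omega
  · rw [if_neg (hns m), if_neg (hns n)]
    simp [Int.xor, hts]

theorem tb_natCast (m : Nat) (i : Nat) : ((m : Int)).testBit i = m.testBit i := rfl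

theorem tb_band (a b : Int) (i : Nat) :
    (PySem.Int.band a b).testBit i = (a.testBit i && b.testBit i) := by
  rw [band_eq_land, Int.testBit_land]

theorem tb_bxor (a b : Int) (i : Nat) :
    (PySem.Int.bxor a b).testBit i = xor (a.testBit i) (b.testBit i) := by
  rw [bxor_eq_xor, Int.testBit_lxor]

theorem tb_shl (x : Int) (n i : Nat) :
    (x <<< ((n : Int))).testBit i = (decide (n ≤ i) && x.testBit (i - n)) := by
  have h1 : (1:Nat) ≤ 2 ^ n := Nat.one_le_two_pow
  rcases x with m | m
  · rw [Int.ofNat_eq_natCast, Int.shiftLeft_natCast, tb_natCast, Nat.testBit_shiftLeft, tb_natCast]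
  · rw [Int.shiftLeft_negSucc]
    simp only [Int.testBit]
    have hb : Nat.shiftLeft' true m n = 2 ^ n * m + (2 ^ n - 1) := by
      have h2 := Nat.shiftLeft'_true_eq_mul_pow m n
      have h3 : (m + 1) * 2 ^ n = 2 ^ n * m + 2 ^ n := by ring
      omega
    rw [hb, Nat.testBit_two_pow_mul_add m (by omega) i]
    by_cases h : i < n
    · simp [h, Nat.testBit_two_pow_sub_one, show ¬ n ≤ i by omega]
    · simp [h, Nat.testBit_two_pow_sub_one, show n ≤ i by omega]

theorem pybit_eq (x : Int) (i : Nat) :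
    pybit x ((i : Int)) = if x.testBit i then 1 else 0 := by
  rw [pybit, if_neg (by omega : ¬ ((i:Int) < 0)),
    PySem.Int.band_one, PySem.Int.mod_eq_emod_of_pos (by norm_num)]
  have hd : ∀ mm : Nat, mm >>> i % 2 = (if (mm : Nat).testBit i then 1 else 0) := by
    intro mm
    rw [Nat.shiftRight_eq_div_pow, Nat.testBit_eq_decide_div_mod_eq]
    rcases Nat.mod_two_eq_zero_or_one (mm / 2 ^ i) with h | h <;> simp [h]
  rcases x with m | m
  · rw [Int.ofNat_eq_natCast, Int.shiftRight_natCast, tb_natCast]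
    have hm := hd m
    by_cases htb : m.testBit i = true
    · rw [if_pos htb] at hm ⊢
      generalize hq : m >>> i = q at hm ⊢
      omega
    · rw [if_neg htb] at hm ⊢
      generalize hq : m >>> i = q at hm ⊢
      omega
  · rw [Int.shiftRight_negSucc]
    have hm := hd m
    by_cases htb : m.testBit i = true
    · rw [if_pos htb] at hm
      rw [if_neg (by simp [Int.testBit, htb] : ¬ (Int.negSucc m).testBit i = true)]
      rw [Int.negSucc_eq]
      generalize hq : m >>> i = q at hm ⊢
      omega
    · rw [if_neg htb] at hm
      have htb' : m.testBit i = false := by simpa using htb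
      rw [if_pos (by simp [Int.testBit, htb'] : (Int.negSucc m).testBit i = true)]
      rw [Int.negSucc_eq]
      generalize hq : m >>> i = q at hm ⊢
      omega

theorem mask32_eq : (1 <<< (32 : Int)) - 1 = ((4294967295 : Nat) : Int) := by decide

theorem tb_mask (i : Nat) : ((1 <<< (32 : Int)) - 1).testBit i = decide (i < 32) := by
  rw [mask32_eq, tb_natCast]
  have : (4294967295 : Nat) = 2 ^ 32 - 1 := by norm_num
  rw [this, Nat.testBit_two_pow_sub_one]

theorem nb_lt (f : Nat → Bool) (k : Nat) : nb f k < 2 ^ k := by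
  induction k with
  | zero => simp [nb]
  | succ k ih =>
    have : 2 ^ (k + 1) = 2 ^ k + 2 ^ k := by ring
    cases h : f k <;> simp [nb, h] <;> omega

theorem nb_testBit (f : Nat → Bool) (k : Nat) (i : Nat) :
    (nb f k).testBit i = (decide (i < k) && f i) := by
  induction k with
  | zero => simp [nb]
  | succ k ih =>
    have hb : nb f (k + 1) = 2 ^ k * (f k).toNat + nb f k := by simp [nb]; ring
    rw [hb, Nat.testBit_two_pow_mul_add _ (nb_lt f k) i]
    by_cases h : i < k
    · simp [h, ih, Nat.lt_succ_of_lt h]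
    · by_cases h2 : i = k
      · subst h2
        simp [h, Nat.lt_succ_self]
        cases hf : f i <;> simp
      · have h3 : ¬ i < k + 1 := by omega
        rw [if_neg h]
        simp only [h3, decide_false, Bool.false_and]
        apply Nat.testBit_eq_false_of_lt
        calc (f k).toNat < 2 ^ 1 := by cases f k <;> simp
          _ ≤ 2 ^ (i - k) := Nat.pow_le_pow_right (by norm_num) (by omega)

-- nonnegative because all high bits vanish
theorem nonneg_of_high_false (x : Int) (N : Nat) (h : ∀ i, N ≤ i → x.testBit i = false) :
    0 ≤ x := by
  rcases x with m | m
  · exact Int.natCast_nonneg m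
  · exfalso
    have h1 : m < 2 ^ (N + m) := by
      calc m < 2 ^ m := Nat.lt_two_pow_self
      _ ≤ 2 ^ (N + m) := Nat.pow_le_pow_right (by norm_num) (by omega)
    have h2 := h (N + m) (by omega)
    simp [Int.testBit, Nat.testBit_lt_two_pow h1] at h2

-- the enumerate-sum of the 0/1 list with bits f equals nb f k
theorem sum_bits (f : Nat → Bool) (k : Nat) :
    (PySem.List.enumerate ((List.range k).map (fun j => if f j then (1:Int) else 0)) 0).foldl
      (fun r p => r + p.2 * 2 ^ p.1.toNat) 0 = ((nb f k : Nat) : Int) := by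
  induction k with
  | zero => simp [nb, PySem.List.enumerate_nil]
  | succ k ih =>
    rw [List.range_succ, List.map_append, PySem.List.enumerate_append, List.foldl_append, ih]
    simp only [List.map_cons, List.map_nil, PySem.List.enumerate_cons, PySem.List.enumerate_nil,
      List.foldl_cons, List.foldl_nil, List.length_map, List.length_range]
    have ht : ((0 + (k:Int))).toNat = k := by omega
    cases hf : f k <;> simp [nb, hf, ht] <;> push_cast <;> ring

-- a fold that ignores the list elements is an iterate of its body
theorem foldl_const {α β : Type} (g : β → β) (l : List α) (b : β) :
    l.foldl (fun r _ => g r) b = g^[l.length] b := by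
  induction l generalizing b with
  | nil => rfl
  | cons a l ih => rw [List.foldl_cons, ih, List.length_cons, Function.iterate_succ_apply]

-- invariant of B's pass: after k passes the low k*S bits agree with obit
theorem B_iter (v m : Int) (S : Nat) (hS1 : 1 ≤ S) (k : Nat) :
    (∀ i, 32 ≤ i →
      (((fun result => PySem.Int.band (PySem.Int.bxor v (PySem.Int.band (result <<< ((S : Int))) m)) ((1 <<< (32:Int)) - 1))^[k]
        (PySem.Int.band v ((1 <<< (32:Int)) - 1))).testBit i) = false) ∧
    (∀ i, i < k * S → i < 32 →
      (((fun result => PySem.Int.band (PySem.Int.bxor v (PySem.Int.band (result <<< ((S : Int))) m)) ((1 <<< (32:Int)) - 1))^[k]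
        (PySem.Int.band v ((1 <<< (32:Int)) - 1))).testBit i) = obit (S - 1) v m i) := by
  induction k with
  | zero =>
    constructor
    · intro i hi
      simp [tb_band, tb_mask, show ¬ i < 32 by omega]
    · intro i hi; omega
  | succ k ih =>
    rw [Function.iterate_succ_apply']
    constructor
    · intro i hi
      simp [tb_band, tb_mask, show ¬ i < 32 by omega]
    · intro i hik hi32
      rw [tb_band, tb_mask, tb_bxor, tb_band, tb_shl]
      by_cases hs : S ≤ i
      · have h1 : i - S < k * S := by
          have : (k + 1) * S = k * S + S := by ring
          omega
        have h2 : i - S < 32 := by omega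
        have hobit : obit (S - 1) v m i = xor (v.testBit i) (obit (S - 1) v m (i - S) && m.testBit i) := by
          rw [obit, dif_neg (by omega : ¬ i < (S - 1) + 1)]
          have hrw : i - ((S - 1) + 1) = i - S := by omega
          rw [hrw]
        rw [ih.2 (i - S) h1 h2, hobit]
        simp [hs, hi32]
      · rw [obit, dif_pos (by omega : i < (S - 1) + 1)]
        simp [hs, hi32]

-- B's loop (one pass per shift-block) computes exactly nb of the intended bits
theorem B_val (v m : Int) (S : Nat) (hS1 : 1 ≤ S) :
    ((PySem.List.pyRange 0 32 ((S : Int))).foldl (fun result _ =>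
        PySem.Int.band (PySem.Int.bxor v (PySem.Int.band (result <<< ((S : Int))) m)) ((1 <<< (32:Int)) - 1))
        (PySem.Int.band v ((1 <<< (32:Int)) - 1)))
      = ((nb (obit (S - 1) v m) 32 : Nat) : Int) := by
  rw [foldl_const]
  -- the loop runs L = ⌈32/S⌉ times, and L*S ≥ 32
  have hlen : (PySem.List.pyRange 0 32 ((S : Int))).length = ((31 + S) / S : Nat) := by
    rw [PySem.List.pyRange_of_pos 0 32 (by exact_mod_cast hS1), if_pos (by norm_num : (0:Int) < 32)]
    have h1 : (32 - 0 + (S:Int) - 1) = (((31 + S : Nat)) : Int) := by push_cast; ring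
    rw [List.length_map, List.length_range, h1, ← Int.natCast_div, Int.toNat_natCast]
  have hLS : 32 ≤ ((31 + S) / S) * S := by
    have hdm := Nat.div_add_mod (31 + S) S
    have hml : (31 + S) % S < S := Nat.mod_lt _ (by omega)
    rw [Nat.mul_comm]
    omega
  rw [hlen]
  have hB := B_iter v m S hS1 ((31 + S) / S)
  obtain ⟨bN, hbN⟩ := Int.eq_ofNat_of_zero_le (nonneg_of_high_false _ 32 hB.1)
  rw [hbN] at hB ⊢
  have hnb : nb (obit (S - 1) v m) 32 = bN := by
    apply Nat.eq_of_testBit_eq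
    intro i
    rw [nb_testBit]
    by_cases hi : i < 32
    · rw [← tb_natCast bN i, hB.2 i (by omega) hi]
      simp [hi]
    · rw [← tb_natCast bN i, hB.1 i (by omega)]
      simp [hi]
  rw [hnb]

-- ===== VERDICT (by name: the statement is the Claim_ definition above) =====
theorem i_shiftl_and_mask_spec : Claim_equal_i_shiftl_and_mask := by
  unfold Claim_equal_i_shiftl_and_mask
  intro v sw m _hdom hpre
  unfold Pre_i_shiftl_and_mask at hpre
  unfold Spec_i_shiftl_and_mask
  obtain ⟨S, hS1, hS32, hcast, hiff, helse⟩ :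
      ∃ S : Nat, 1 ≤ S ∧ S ≤ 32 ∧ min sw 32 = (S:Int) ∧
        (∀ j : Nat, j < 32 → (((j:Int)) < sw ↔ j < S)) ∧
        (∀ j : Nat, j < 32 → ¬ ((j:Int) < sw) → (j:Int) - sw = ((j - S : Nat) : Int)) := by
    rcases le_total sw 32 with h | h
    · exact ⟨sw.toNat, by omega, by omega, by rw [min_eq_left h]; omega,
        fun j hj => by omega, fun j hj hge => by omega⟩
    · exact ⟨32, by omega, le_refl _, by rw [min_eq_right h]; norm_num,
        fun j hj => by constructor <;> intro <;> omega, fun j hj hge => by omega⟩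
  -- the A loop produces exactly the bits of obit (S-1)
  have hout : ∀ k, k ≤ 32 →
      (((List.range k).map (fun (j : Nat) => (j:Int))).foldl (fun (out : List Int) (i : Int) =>
        if i < sw then
          out ++ [pybit v i]
        else
          out ++ [PySem.Int.bxor (pybit v i)
            (PySem.Int.band (PySem.List.pyGetD out (i - sw) 0) (pybit m i))]) [])
      = (List.range k).map (fun j => if obit (S - 1) v m j then (1:Int) else 0) := by
    intro k
    induction k with
    | zero => simp
    | succ k ihk =>
      intro hk32
      have hk : k ≤ 32 := by omega
      rw [List.range_succ, List.map_append, List.map_append, List.foldl_append, ihk hk]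
      simp only [List.map_cons, List.map_nil, List.foldl_cons, List.foldl_nil]
      by_cases hik : ((k:Int)) < sw
      · rw [if_pos hik, pybit_eq]
        rw [obit, dif_pos (by have := (hiff k (by omega)).mp hik; omega : k < (S - 1) + 1)]
      · rw [if_neg hik]
        have hkS : ¬ k < S := fun h => hik ((hiff k (by omega)).mpr h)
        rw [helse k (by omega) hik]
        have hlt : k - S < k := by omega
        rw [PySem.List.pyGetD_eq_getElem _ _ (by omega) (by simp; omega)]
        have hget : ((List.range k).map (fun j => if obit (S - 1) v m j then (1:Int) else 0))[((k - S : Nat):Int).toNat]'(by simp; omega)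
            = (if obit (S - 1) v m (k - S) then (1:Int) else 0) := by
          simp
        have hobit : obit (S - 1) v m k = xor (v.testBit k) (obit (S - 1) v m (k - S) && m.testBit k) := by
          rw [obit, dif_neg (by omega : ¬ k < (S - 1) + 1)]
          have hrw : k - ((S - 1) + 1) = k - S := by omega
          rw [hrw]
        rw [hget, pybit_eq, pybit_eq, hobit]
        cases hb1 : v.testBit k <;> cases hb2 : obit (S - 1) v m (k - S) <;>
          cases hb3 : m.testBit k <;> simp [hb1, hb2, hb3] <;> decide
  -- assemble
  simp only [i_shiftl_and_mask, i_shiftl_and_mask_alt]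
  have h32 : ((32:Nat):Int) = (32:Int) := by norm_num
  have hrange : PySem.List.pyRange (0:Int) 32 = (List.range 32).map (fun (k : Nat) => (k:Int)) := by
    rw [← h32, PySem.List.pyRange_zero_natCast]
  rw [hrange, hout 32 (le_refl _), sum_bits (obit (S - 1) v m) 32, hcast,
    B_val v m S hS1]
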